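-- pv_equiv track=rewrite | github.com/ARZ-ZRA/Programming-examples | Dinamic programming/sort_list_piramida_kucha.py | count_top_piramida
-- ===== SOURCE A (Python) =====
-- def count_top_piramida(list: list):
--     """
--     Функция нахождения количества вершин пирамиды
--     >>> count_top_piramida(list(range(1, 8)))
--     3
--     >>> count_top_piramida(list(range(1, 9)))
--     4
--     """
--     if len(list) > 0:
--         i = 1
--         top = 1
--         while i < len(list):
--             i = 2**top
--             if i <= len(list):
--                 top += 1
--             else:
--                 break
--     return top
-- ===== SOURCE B (Python) =====
-- def count_top_piramida(list: list):
--     if len(list) > 0: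
--         top = len(list).bit_length()
--     return top
-- ===== Notes on version B (the rewrite author's own statement) =====
-- stated objective: simpler
-- what changed: Replaces the doubling while-loop with the closed form len(list).bit_length(), keeping the emptiness guard so an empty list still raises.
import Mathlib
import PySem

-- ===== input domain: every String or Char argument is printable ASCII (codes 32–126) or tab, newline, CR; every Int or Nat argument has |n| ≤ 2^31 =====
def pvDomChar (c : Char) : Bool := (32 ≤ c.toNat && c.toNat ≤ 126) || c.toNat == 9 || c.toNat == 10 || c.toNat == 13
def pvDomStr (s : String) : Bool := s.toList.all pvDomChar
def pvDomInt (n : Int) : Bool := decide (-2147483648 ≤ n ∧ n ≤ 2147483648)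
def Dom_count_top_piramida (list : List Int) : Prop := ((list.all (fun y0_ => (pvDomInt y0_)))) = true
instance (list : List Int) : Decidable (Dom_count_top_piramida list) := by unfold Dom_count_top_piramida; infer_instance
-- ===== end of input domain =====

-- B replaces A's doubling while-loop by the closed form bit_length (Nat.size) under the same non-empty guard: simpler.


-- ===== PORT A =====
-- the while-loop of A, with fuel (the loop runs at most log2 n + 1 ≤ n times, so fuel = n suffices)
def ctpLoop (n : Nat) : Nat → Nat → Nat → Nat
  | 0, _i, top => top
  | fuel + 1, i, top =>
      if i < n then
        let i2 := 2 ^ top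
        if i2 ≤ n then ctpLoop n fuel i2 (top + 1) else top
      else top

def count_top_piramida (list : List Int) : Int :=
  if list.length > 0 then (ctpLoop list.length list.length 1 1 : Int)
  else 0  -- Python raises UnboundLocalError here; excluded by Pre_

-- ===== PORT B =====
def count_top_piramida_alt (list : List Int) : Int :=
  if list.length > 0 then (Nat.size list.length : Int)  -- Nat.size = Python int.bit_length on Nat
  else 0  -- Python B raises here too; excluded by Pre_

-- ===== PRECONDITION & SPEC =====
-- Pre_ excludes the empty list, on which both Pythons raise UnboundLocalError.
def Pre_count_top_piramida (list : List Int) : Prop := list ≠ []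
instance (list : List Int) : Decidable (Pre_count_top_piramida list) := by unfold Pre_count_top_piramida; infer_instance
def pvWitness_count_top_piramida : List Int := [1, 2, 3]

def Spec_count_top_piramida (list : List Int) (out : Int) : Prop := out = count_top_piramida_alt list
instance (list : List Int) (out : Int) : Decidable (Spec_count_top_piramida list out) := by unfold Spec_count_top_piramida; infer_instance

-- ===== CLAIM (what is proved, stated in full; the proofs are below) =====
def Claim_equal_count_top_piramida : Prop := ∀ (list : List Int), Dom_count_top_piramida list → Pre_count_top_piramida list → Spec_count_top_piramida list (count_top_piramida list)

-- ===== LEMMAS AND PROOFS =====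
lemma size_eq_of_between {n top : Nat} (h1 : 1 ≤ top) (hlo : 2 ^ (top - 1) ≤ n) (hhi : n < 2 ^ top) :
    Nat.size n = top := by
  have hle : Nat.size n ≤ top := Nat.size_le.mpr hhi
  have hlt : top - 1 < Nat.size n := Nat.lt_size.mpr hlo
  omega

lemma ctpLoop_eq_size (fuel : Nat) : ∀ (n i top : Nat), 1 ≤ top → i = 2 ^ (top - 1) → i ≤ n →
    n < 2 ^ (top - 1 + fuel) → ctpLoop n fuel i top = Nat.size n := by
  induction fuel with
  | zero =>
      intro n i top h1 hi hle hf
      subst hi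
      simp only [Nat.add_zero] at hf
      omega
  | succ fuel ih =>
      intro n i top h1 hi hle hf
      simp only [ctpLoop]
      by_cases hlt : i < n
      · simp only [hlt, if_true]
        by_cases h2 : 2 ^ top ≤ n
        · simp only [h2, if_true]
          have : top + 1 - 1 + fuel = top - 1 + (fuel + 1) := by omega
          exact ih n (2 ^ top) (top + 1) (by omega) (by simp) h2 (by rw [this]; exact hf)
        · simp only [h2, if_false]
          exact (size_eq_of_between h1 (hi ▸ hle) (by omega)).symm ▸ rfl
      · simp only [hlt, if_false]
        have hn : n = 2 ^ (top - 1) := by omega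
        exact (size_eq_of_between h1 (hi ▸ hle) (by rw [hn]; exact Nat.pow_lt_pow_right (by norm_num) (by omega))).symm ▸ rfl

-- ===== VERDICT (by name: the statement is the Claim_ definition above) =====
theorem count_top_piramida_spec : Claim_equal_count_top_piramida := by
  intro l _hd hpre
  have hn : 0 < l.length := List.length_pos_iff.mpr hpre
  unfold Spec_count_top_piramida count_top_piramida count_top_piramida_alt
  simp only [hn, if_pos]
  have := ctpLoop_eq_size l.length l.length 1 1 (le_refl 1) (by norm_num) hn
    (by simpa using Nat.lt_two_pow_self (n := l.length))
  exact_mod_cast this
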